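-- pv_equiv track=rewrite | github.com/8x15yz/Algorithm-Solutions | 2023/programers/08/외계어사전.py | solution
-- ===== SOURCE A (Python) =====
-- def solution(spell, dic):
--     answer = 0
--     # spell, dic =
--     for word in dic:
--         spelling = {key:0 for key in spell}
--         for w in word:
--             if w in spell and spelling[w] != 1: spelling[w] = 1
--             else: break
--         else:
--             if 0 in spelling.values(): break
--             else: return 1
--
--     return 2
-- ===== SOURCE B (Python) =====
-- def solution(spell, dic):
--     # Sort-and-merge strategy: canonicalise spell once as its sorted distinct
--     # letters, canonicalise each word by sorting, then decide everything with
--     # ordered scans instead of dict marking.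
--     target = sorted(set(spell))
--     for word in dic:
--         key = sorted(word)
--         # sorted, so duplicates are adjacent
--         if any(a == b for a, b in zip(key, key[1:])):
--             continue
--         # ordered merge: key is a subset of spell iff this scan consumes all of key
--         rest = key
--         for t in target:
--             if rest and rest[0] == t:
--                 rest = rest[1:]
--         if not rest:
--             return 1 if key == target else 2
--     return 2
-- ===== Notes on version B (the rewrite author's own statement) =====
-- stated objective: faster
-- what changed: Replaces A's per-word dict-of-flags marking (rebuild {key:0} per word, char-by-char marking with break/else, linear 'w in spell' per char, final values() scan) with a sort-and-merge algorithm: spell is canonicalised once as its sorted distinct letters, each word is sorted, duplicates are detected as adjacent equal pairs, subset is an ordered merge scan, and full use is equality of the two canonical forms.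
import Mathlib
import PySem

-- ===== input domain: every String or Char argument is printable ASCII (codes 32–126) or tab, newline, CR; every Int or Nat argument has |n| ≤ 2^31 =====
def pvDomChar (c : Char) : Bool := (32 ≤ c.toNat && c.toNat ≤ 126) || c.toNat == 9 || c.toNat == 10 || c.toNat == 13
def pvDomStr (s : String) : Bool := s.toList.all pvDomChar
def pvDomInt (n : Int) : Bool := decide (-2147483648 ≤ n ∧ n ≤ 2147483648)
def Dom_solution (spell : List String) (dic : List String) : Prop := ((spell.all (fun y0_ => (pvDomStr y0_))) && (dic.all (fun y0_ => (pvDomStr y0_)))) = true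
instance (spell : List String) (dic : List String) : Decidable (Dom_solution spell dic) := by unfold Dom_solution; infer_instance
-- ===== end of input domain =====

-- B replaces A's per-word dict-of-flags marking with sort-and-merge: spell canonicalised once
-- as its sorted distinct letters, each word sorted, duplicates found as adjacent pairs, subset
-- by an ordered merge scan, full use by equality of canonical forms (alternative algorithm).

-- ===== PORT A =====
-- one-character string, as Python's iteration over a str yields length-1 strings
def mkStr (c : Char) : String := String.ofList [c]

-- spelling = {key:0 for key in spell}
def buildSpelling (spell : List String) : PySem.Dict String Int :=
  spell.foldl (fun d k => d.insert k 0) PySem.Dict.empty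

-- the inner 'for w in word: …' loop; none = the loop broke, some sp = it ran to completion
def innerA (spell : List String) (sp : PySem.Dict String Int) : List Char → Option (PySem.Dict String Int)
  | [] => some sp
  | c :: rest =>
      let w := mkStr c
      if spell.contains w ∧ sp.get? w ≠ some 1 then innerA spell (sp.insert w 1) rest
      else none

-- the outer 'for word in dic' loop
def outerA (spell : List String) : List String → Int
  | [] => 2
  | word :: rest =>
      match innerA spell (buildSpelling spell) word.toList with
      | none => outerA spell rest
      | some sp => if (0 : Int) ∈ sp.values then 2 else 1

def solution (spell : List String) (dic : List String) : Int :=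
  outerA spell dic

-- ===== PORT B =====
-- any(a == b for a, b in zip(key, key[1:])): scan adjacent pairs
def hasAdjDup : List String → Bool
  | a :: b :: rest => a == b || hasAdjDup (b :: rest)
  | _ => false

-- one step of the merge scan: 'if rest and rest[0] == t: rest = rest[1:]'
def scanStep (r : List String) (t : String) : List String :=
  match r with
  | [] => []
  | k :: ks => if k = t then ks else k :: ks

-- 'for t in target: …' over the remaining key suffix
def scanT (key target : List String) : List String :=
  target.foldl scanStep key

def loopB (target : List String) : List String → Int
  | [] => 2
  | word :: rest =>
      let key := PySem.List.sorted (word.toList.map mkStr) (fun x => x) false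
      if hasAdjDup key then loopB target rest
      else if scanT key target = [] then (if key = target then 1 else 2)
      else loopB target rest

def solution_alt (spell : List String) (dic : List String) : Int :=
  loopB (PySem.List.sorted (PySem.Set.ofList spell) (fun x => x) false) dic

-- ===== PRECONDITION & SPEC =====
def Spec_solution (spell : List String) (dic : List String) (out : Int) : Prop := out = solution_alt spell dic
instance (spell : List String) (dic : List String) (out : Int) : Decidable (Spec_solution spell dic out) := by unfold Spec_solution; infer_instance

-- ===== CLAIM (what is proved, stated in full; the proofs are below) =====
def Claim_equal_solution : Prop := ∀ (spell : List String) (dic : List String), Dom_solution spell dic → Spec_solution spell dic (solution spell dic)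

-- ===== LEMMAS AND PROOFS =====

-- the invariant carried through A's inner loop: keys are unique and every lookup is
-- 'some 1' on marked spell letters, 'some 0' on unmarked ones, 'none' off spell
def SpInv (spell marked : List String) (sp : PySem.Dict String Int) : Prop :=
  sp.keys.Nodup ∧
  ∀ k, sp.get? k = if k ∈ spell then some (if k ∈ marked then (1 : Int) else 0) else none

lemma buildSpelling_get? (spell : List String) (k : String) :
    ∀ d : PySem.Dict String Int,
      (spell.foldl (fun d k => d.insert k 0) d).get? k =
        if k ∈ spell then some (0 : Int) else d.get? k := by
  induction spell with
  | nil => intro d; simp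
  | cons x xs ih =>
      intro d
      simp only [List.foldl_cons, ih, PySem.Dict.get?_insert]
      by_cases hx : k = x <;> by_cases hxs : k ∈ xs <;> simp [hx, hxs]

lemma buildSpelling_inv (spell : List String) : SpInv spell [] (buildSpelling spell) := by
  constructor
  · exact PySem.Dict.nodup_keys_foldl_insert spell (fun _ _ => (0 : Int)) PySem.Dict.empty
      PySem.Dict.nodup_keys_empty
  · intro k
    simpa [buildSpelling] using buildSpelling_get? spell k PySem.Dict.empty

-- A's inner loop runs to completion exactly on duplicate-free words inside spell \ marked,
-- and then the dict satisfies the invariant with the word's letters marked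
lemma innerA_spec (spell : List String) :
    ∀ (cs : List Char) (marked : List String) (sp : PySem.Dict String Int),
      SpInv spell marked sp →
      (if (cs.map mkStr).Nodup ∧ ∀ c ∈ cs, mkStr c ∈ spell ∧ mkStr c ∉ marked then
        ∃ sp', innerA spell sp cs = some sp' ∧ SpInv spell (cs.map mkStr ++ marked) sp'
      else innerA spell sp cs = none) := by
  intro cs
  induction cs with
  | nil =>
      intro marked sp hinv
      rw [if_pos (by simp)]
      exact ⟨sp, rfl, by simpa using hinv⟩
  | cons c rest ih =>
      intro marked sp hinv
      obtain ⟨hnd, hget⟩ := hinv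
      by_cases hc : mkStr c ∈ spell ∧ mkStr c ∉ marked
      · -- the guard of the inner if holds: the loop marks c and continues
        have hguard : (spell.contains (mkStr c) = true) ∧ sp.get? (mkStr c) ≠ some 1 := by
          refine ⟨by simpa using hc.1, ?_⟩
          rw [hget]; simp [hc.1, hc.2]
        have hstep : innerA spell sp (c :: rest) = innerA spell (sp.insert (mkStr c) 1) rest := by
          simp only [innerA]
          rw [if_pos hguard]
        have hinv' : SpInv spell (mkStr c :: marked) (sp.insert (mkStr c) 1) := by
          refine ⟨PySem.Dict.nodup_keys_insert _ _ _ hnd, ?_⟩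
          intro k
          rw [PySem.Dict.get?_insert, hget]
          by_cases hk : k = mkStr c
          · simp [hk, hc.1]
          · simp [hk]
        have hih := ih (mkStr c :: marked) (sp.insert (mkStr c) 1) hinv'
        by_cases hrest : (rest.map mkStr).Nodup ∧
            ∀ x ∈ rest, mkStr x ∈ spell ∧ mkStr x ∉ mkStr c :: marked
        · rw [if_pos hrest] at hih
          obtain ⟨sp', hrun, hinv''⟩ := hih
          have hcond : ((c :: rest).map mkStr).Nodup ∧
              ∀ x ∈ c :: rest, mkStr x ∈ spell ∧ mkStr x ∉ marked := by
            constructor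
            · rw [List.map_cons, List.nodup_cons]
              refine ⟨?_, hrest.1⟩
              intro hmem
              obtain ⟨x, hx, hxe⟩ := List.mem_map.mp hmem
              exact ((hrest.2 x hx).2) (by rw [hxe]; exact List.mem_cons_self)
            · intro x hx
              rcases List.mem_cons.mp hx with h | h
              · exact h ▸ hc
              · exact ⟨(hrest.2 x h).1,
                  fun hm => (hrest.2 x h).2 (List.mem_cons_of_mem _ hm)⟩
          rw [if_pos hcond]
          refine ⟨sp', hstep.trans hrun, hinv''.1, fun k => (hinv''.2 k).trans ?_⟩
          by_cases hsp : k ∈ spell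
          · simp only [hsp, if_true]
            have hmemiff : (k ∈ rest.map mkStr ++ mkStr c :: marked) ↔
                k ∈ (c :: rest).map mkStr ++ marked := by
              simp only [List.map_cons, List.mem_append, List.mem_cons]
              tauto
            by_cases hm : k ∈ rest.map mkStr ++ mkStr c :: marked
            · rw [if_pos hm, if_pos (hmemiff.mp hm)]
            · rw [if_neg hm, if_neg (fun hh => hm (hmemiff.mpr hh))]
          · simp [hsp]
        · rw [if_neg hrest] at hih
          have hcond : ¬ (((c :: rest).map mkStr).Nodup ∧
              ∀ x ∈ c :: rest, mkStr x ∈ spell ∧ mkStr x ∉ marked) := by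
            intro hcontr
            apply hrest
            have hnd' := hcontr.1
            rw [List.map_cons, List.nodup_cons] at hnd'
            refine ⟨hnd'.2, fun x hx => ?_⟩
            refine ⟨(hcontr.2 x (List.mem_cons_of_mem _ hx)).1, ?_⟩
            intro hm
            rcases List.mem_cons.mp hm with h | h
            · exact hnd'.1 (h ▸ List.mem_map.mpr ⟨x, hx, rfl⟩)
            · exact (hcontr.2 x (List.mem_cons_of_mem _ hx)).2 h
          rw [if_neg hcond]
          exact hstep.trans hih
      · -- the guard fails: Python breaks immediately
        have hguard : ¬ ((spell.contains (mkStr c) = true) ∧ sp.get? (mkStr c) ≠ some 1) := by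
          intro hcontr
          apply hc
          have h1 : mkStr c ∈ spell := by simpa using hcontr.1
          refine ⟨h1, fun hm => hcontr.2 ?_⟩
          rw [hget]; simp [h1, hm]
        have hcond : ¬ (((c :: rest).map mkStr).Nodup ∧
            ∀ x ∈ c :: rest, mkStr x ∈ spell ∧ mkStr x ∉ marked) := by
          intro hcontr; exact hc (hcontr.2 c List.mem_cons_self)
        rw [if_neg hcond]
        simp only [innerA]
        exact if_neg hguard

-- 0 survives in the dict's values exactly when some spell letter was never marked
lemma zero_mem_values (spell marked : List String) (sp : PySem.Dict String Int)
    (hinv : SpInv spell marked sp) :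
    ((0 : Int) ∈ sp.values) ↔ ∃ k ∈ spell, k ∉ marked := by
  obtain ⟨hnd, hget⟩ := hinv
  have hkeys : ∀ k, k ∈ sp.keys ↔ k ∈ spell := by
    intro k
    rw [← not_iff_not, ← PySem.Dict.get?_eq_none_iff_not_mem_keys, hget]
    by_cases h : k ∈ spell <;> simp [h]
  rw [PySem.Dict.values_eq_map_keys sp hnd 0]
  simp only [List.mem_map]
  constructor
  · rintro ⟨k, hk, hv⟩
    have hks := (hkeys k).mp hk
    refine ⟨k, hks, fun hm => ?_⟩
    rw [PySem.Dict.getD_eq_get?_getD, hget] at hv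
    simp [hks, hm] at hv
  · rintro ⟨k, hks, hm⟩
    refine ⟨k, (hkeys k).mpr hks, ?_⟩
    rw [PySem.Dict.getD_eq_get?_getD, hget]
    simp [hks, hm]

-- B-side lemma: on a (≤)-sorted list, no adjacent duplicate pair ↔ no duplicate at all
lemma hasAdjDup_false_iff (l : List String) (hle : l.Pairwise (· ≤ ·)) :
    hasAdjDup l = false ↔ l.Nodup := by
  induction l with
  | nil => simp [hasAdjDup]
  | cons a t ih =>
      cases t with
      | nil => simp [hasAdjDup]
      | cons b rest =>
          have hle' : (b :: rest).Pairwise (· ≤ ·) := hle.tail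
          have hab : a ≤ b := (List.pairwise_cons.mp hle).1 b List.mem_cons_self
          have hball : ∀ x ∈ rest, b ≤ x :=
            fun x hx => (List.pairwise_cons.mp hle').1 x hx
          rw [List.nodup_cons]
          simp only [hasAdjDup, Bool.or_eq_false_iff, beq_eq_false_iff_ne, ih hle']
          constructor
          · rintro ⟨hne, hnd⟩
            refine ⟨?_, hnd⟩
            intro hmem
            rcases List.mem_cons.mp hmem with h | h
            · exact hne h
            · exact hne (le_antisymm hab (le_trans (hball a h) (le_of_eq rfl)))
          · rintro ⟨hnm, hnd⟩
            exact ⟨fun h => hnm (h ▸ List.mem_cons_self), hnd⟩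

-- if the merge scan consumes all of key, key is a sublist of target
lemma scanT_nil_sublist : ∀ (target key : List String),
    scanT key target = [] → key.Sublist target := by
  intro target
  induction target with
  | nil =>
      intro key h
      rw [scanT, List.foldl_nil] at h
      simp [h]
  | cons t ts ih =>
      intro key h
      rw [scanT, List.foldl_cons] at h
      cases key with
      | nil => exact List.nil_sublist _
      | cons k ks =>
          by_cases hk : k = t
          · have := ih ks (by simpa [scanT, scanStep, hk] using h)
            exact hk ▸ List.Sublist.cons₂ _ this
          · have := ih (k :: ks) (by simpa [scanT, scanStep, hk] using h)
            exact List.Sublist.cons _ this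

-- on strictly sorted lists the merge scan succeeds whenever key ⊆ target
lemma scanT_nil_of_subset : ∀ (target key : List String),
    key.Pairwise (· < ·) → target.Pairwise (· < ·) →
    (∀ x ∈ key, x ∈ target) → scanT key target = [] := by
  intro target
  induction target with
  | nil =>
      intro key _ _ hsub
      cases key with
      | nil => rfl
      | cons k ks => exact absurd (hsub k List.mem_cons_self) (List.not_mem_nil)
  | cons t ts ih =>
      intro key hkey htgt hsub
      rw [scanT, List.foldl_cons]
      cases key with
      | nil =>
          show scanT (scanStep [] t) ts = []
          exact ih [] List.Pairwise.nil htgt.tail (by simp)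
      | cons k ks =>
          have hklt : ∀ x ∈ ks, k < x := fun x hx => (List.pairwise_cons.mp hkey).1 x hx
          have htlt : ∀ x ∈ ts, t < x := fun x hx => (List.pairwise_cons.mp htgt).1 x hx
          by_cases hk : k = t
          · show scanT (scanStep (k :: ks) t) ts = []
            rw [scanStep, if_pos hk]
            refine ih ks hkey.tail htgt.tail ?_
            intro x hx
            rcases List.mem_cons.mp (hsub x (List.mem_cons_of_mem _ hx)) with h | h
            · exact absurd (h ▸ hk ▸ hklt x hx) (lt_irrefl _)
            · exact h
          · show scanT (scanStep (k :: ks) t) ts = []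
            rw [scanStep, if_neg hk]
            have hkin : k ∈ ts := by
              rcases List.mem_cons.mp (hsub k List.mem_cons_self) with h | h
              · exact absurd h hk
              · exact h
            refine ih (k :: ks) hkey htgt.tail ?_
            intro x hx
            rcases List.mem_cons.mp hx with h | h
            · exact h ▸ hkin
            · rcases List.mem_cons.mp (hsub x (List.mem_cons_of_mem _ h)) with h2 | h2
              · exact absurd (h2 ▸ hklt x h) (asymm (h2 ▸ htlt k hkin))
              · exact h2
  -- (for x ∈ ks with x = t: k < x = t but t < k from k ∈ ts — impossible)

-- two strictly sorted lists with the same members are equal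
lemma eq_of_sorted_lt_of_mem_iff : ∀ (l₁ l₂ : List String),
    l₁.Pairwise (· < ·) → l₂.Pairwise (· < ·) →
    (∀ x, x ∈ l₁ ↔ x ∈ l₂) → l₁ = l₂ := by
  intro l₁
  induction l₁ with
  | nil =>
      intro l₂ _ _ hiff
      cases l₂ with
      | nil => rfl
      | cons t ts => exact absurd ((hiff t).mpr List.mem_cons_self) (List.not_mem_nil)
  | cons k ks ih =>
      intro l₂ h₁ h₂ hiff
      cases l₂ with
      | nil => exact absurd ((hiff k).mp List.mem_cons_self) (List.not_mem_nil)
      | cons t ts =>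
          have hklt : ∀ x ∈ ks, k < x := fun x hx => (List.pairwise_cons.mp h₁).1 x hx
          have htlt : ∀ x ∈ ts, t < x := fun x hx => (List.pairwise_cons.mp h₂).1 x hx
          have hkt : k = t := by
            rcases List.mem_cons.mp ((hiff k).mp List.mem_cons_self) with h | h
            · exact h
            · rcases List.mem_cons.mp ((hiff t).mpr List.mem_cons_self) with h' | h'
              · exact h'.symm
              · exact absurd (htlt k h) (asymm (hklt t h'))
          subst hkt
          have : ks = ts := by
            refine ih ts h₁.tail h₂.tail ?_
            intro x
            constructor
            · intro hx
              rcases List.mem_cons.mp ((hiff x).mp (List.mem_cons_of_mem _ hx)) with h | h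
              · exact absurd (h ▸ hklt x hx) (lt_irrefl _)
              · exact h
            · intro hx
              rcases List.mem_cons.mp ((hiff x).mpr (List.mem_cons_of_mem _ hx)) with h | h
              · exact absurd (h ▸ htlt x hx) (lt_irrefl _)
              · exact h
          rw [this]

-- per-word equivalence of the two loop bodies, then the outer induction
lemma outer_eq (spell : List String) : ∀ dic : List String,
    outerA spell dic = loopB (PySem.List.sorted (PySem.Set.ofList spell) (fun x => x) false) dic := by
  intro dic
  set target := PySem.List.sorted (PySem.Set.ofList spell) (fun x => x) false with htgtdef
  have htgt_pw : target.Pairwise (· < ·) := PySem.List.sorted_ofList_pairwise_lt spell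
  have htgt_mem : ∀ x, x ∈ target ↔ x ∈ spell := by
    intro x
    rw [htgtdef, PySem.List.mem_sorted, PySem.Set.mem_ofList]
  induction dic with
  | nil => rfl
  | cons word rest ih =>
      set key := PySem.List.sorted (word.toList.map mkStr) (fun x => x) false with hkeydef
      have hkey_le : key.Pairwise (· ≤ ·) := by
        have := PySem.List.sorted_pairwise (word.toList.map mkStr) (fun x => x) 
        simpa using this
      have hkey_mem : ∀ x, x ∈ key ↔ x ∈ word.toList.map mkStr := by
        intro x; rw [hkeydef, PySem.List.mem_sorted]
      have hkey_nd : key.Nodup ↔ (word.toList.map mkStr).Nodup :=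
        (PySem.List.sorted_perm (word.toList.map mkStr) (fun x => x) false).nodup_iff
      have hspec := innerA_spec spell word.toList [] (buildSpelling spell)
        (buildSpelling_inv spell)
      by_cases hcond : (word.toList.map mkStr).Nodup ∧
          ∀ c ∈ word.toList, mkStr c ∈ spell ∧ mkStr c ∉ ([] : List String)
      · rw [if_pos hcond] at hspec
        obtain ⟨sp, hrun, hinv⟩ := hspec
        have hzero := zero_mem_values spell (word.toList.map mkStr ++ []) sp hinv
        simp only [List.append_nil] at hzero
        have hkey_pw : key.Pairwise (· < ·) :=
          (hkey_le.and (List.nodup_iff_pairwise_ne.mp (hkey_nd.mpr hcond.1))).imp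
            (fun h => lt_of_le_of_ne h.1 h.2)
        have hadj : hasAdjDup key = false :=
          (hasAdjDup_false_iff key hkey_le).mpr (hkey_nd.mpr hcond.1)
        have hscan : scanT key target = [] := by
          refine scanT_nil_of_subset target key hkey_pw htgt_pw ?_
          intro x hx
          obtain ⟨c, hc, hce⟩ := List.mem_map.mp ((hkey_mem x).mp hx)
          exact (htgt_mem x).mpr (hce ▸ (hcond.2 c hc).1)
        have hA : outerA spell (word :: rest) = (if (0 : Int) ∈ sp.values then 2 else 1) := by
          simp only [outerA, hrun]
        have hB : loopB target (word :: rest) = (if key = target then 1 else 2) := by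
          simp only [loopB, ← hkeydef, hadj, Bool.false_eq_true, if_false, hscan, if_true]
        rw [hA, hB]
        by_cases heq : key = target
        · have hall : ¬ ∃ k ∈ spell, k ∉ word.toList.map mkStr := by
            rintro ⟨k, hk, hnm⟩
            exact hnm ((hkey_mem k).mp (heq ▸ (htgt_mem k).mpr hk))
          rw [if_pos heq, if_neg (fun h => hall (hzero.mp h))]
        · have hex : ∃ k ∈ spell, k ∉ word.toList.map mkStr := by
            by_contra hno
            push Not at hno
            apply heq
            refine eq_of_sorted_lt_of_mem_iff key target hkey_pw htgt_pw ?_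
            intro x
            rw [hkey_mem, htgt_mem]
            constructor
            · intro hx
              obtain ⟨c, hc, hce⟩ := List.mem_map.mp hx
              exact hce ▸ (hcond.2 c hc).1
            · exact hno x
          rw [if_neg heq, if_pos (hzero.mpr hex)]
      · rw [if_neg hcond] at hspec
        have hA : outerA spell (word :: rest) = outerA spell rest := by
          simp only [outerA, hspec]
        have hB : loopB target (word :: rest) = loopB target rest := by
          by_cases hadj : hasAdjDup key = true
          · simp only [loopB, ← hkeydef, hadj, if_true]
          · have hadjf : hasAdjDup key = false := by
              cases h : hasAdjDup key
              · rfl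
              · exact absurd h hadj
            have hnd : (word.toList.map mkStr).Nodup :=
              hkey_nd.mp ((hasAdjDup_false_iff key hkey_le).mp hadjf)
            have hnsub : ¬ ∀ c ∈ word.toList, mkStr c ∈ spell := by
              intro hsub
              exact hcond ⟨hnd, fun c hc => ⟨hsub c hc, by simp⟩⟩
            have hscan : scanT key target ≠ [] := by
              intro hs
              apply hnsub
              intro c hc
              have hsl := scanT_nil_sublist target key hs
              exact (htgt_mem (mkStr c)).mp
                (hsl.mem ((hkey_mem (mkStr c)).mpr (List.mem_map.mpr ⟨c, hc, rfl⟩)))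
            simp only [loopB, ← hkeydef, hadjf, Bool.false_eq_true, if_false, hscan]
        rw [hA, hB, ih]

-- ===== VERDICT (by name: the statement is the Claim_ definition above) =====
theorem solution_spec : Claim_equal_solution := by
  intro spell dic _
  show solution spell dic = solution_alt spell dic
  exact outer_eq spell dic
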